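-- pv_equiv track=rewrite | github.com/koshimazaki/Koshi-Flux | flux/src/koshi_flux/shared/parameter_adapter.py | _expand_prompts
-- ===== SOURCE A (Python) =====
-- from typing import Dict, List, Optional, Tuple, Any, Union
--
-- def _expand_prompts(
--
--     prompts: Dict[int, str],
--     num_frames: int
-- ) -> Dict[int, str]:
--     """
--     Expand keyframe prompts to per-frame mapping.
--
--     Args:
--         prompts: Dict of frame_index -> prompt
--         num_frames: Total frames
--
--     Returns:
--         Dict where each frame has its effective prompt
--     """
--     if not prompts:
--         return {}
--
--     result = {}
--     sorted_frames = sorted(prompts.keys())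
--
--     current_prompt = None
--     for i in range(num_frames):
--         # Find active prompt for this frame
--         for kf in sorted_frames:
--             if kf <= i:
--                 current_prompt = prompts[kf]
--
--         if current_prompt:
--             result[i] = current_prompt
--
--     return result
-- ===== SOURCE B (Python) =====
-- def _expand_prompts(prompts, num_frames):
--     if not prompts:
--         return {}
--     kfs = sorted(prompts)
--     result = {}
--     for kf, nxt in zip(kfs, kfs[1:] + [num_frames]):
--         text = prompts[kf]
--         if text:
--             for i in range(max(kf, 0), min(nxt, num_frames)):
--                 result[i] = text
--     return result
-- ===== Notes on version B (the rewrite author's own statement) =====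
-- stated objective: faster
-- what changed: Instead of looping over every frame and rescanning all keyframes, B iterates once over the sorted keyframes paired with their successors and fills each frame segment [max(kf,0), min(next_kf,num_frames)) directly.
import Mathlib
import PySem

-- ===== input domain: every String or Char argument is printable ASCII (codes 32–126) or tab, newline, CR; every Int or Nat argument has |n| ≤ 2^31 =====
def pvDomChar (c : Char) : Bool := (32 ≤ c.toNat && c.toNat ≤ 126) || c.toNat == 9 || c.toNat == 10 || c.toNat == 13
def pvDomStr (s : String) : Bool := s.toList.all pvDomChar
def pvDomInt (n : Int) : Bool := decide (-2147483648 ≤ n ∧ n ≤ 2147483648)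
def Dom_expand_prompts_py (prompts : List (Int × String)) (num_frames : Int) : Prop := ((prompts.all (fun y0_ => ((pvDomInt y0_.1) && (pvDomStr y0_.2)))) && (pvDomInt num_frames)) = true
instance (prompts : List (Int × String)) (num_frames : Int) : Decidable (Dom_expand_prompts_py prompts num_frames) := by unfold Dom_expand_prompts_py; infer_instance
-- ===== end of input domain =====

-- B replaces A's per-frame rescan of all keyframes by one pass over the sorted
-- keyframes that fills each frame segment [max(kf,0), min(next_kf,num_frames)) directly (objective: faster).

-- ===== PORT A =====
-- inner loop: 'for kf in sorted_frames: if kf <= i: current_prompt = prompts[kf]'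
def aScan (d : PySem.Dict Int String) (ks : List Int) (i : Int) (c : Option String) : Option String :=
  ks.foldl (fun c kf => if kf ≤ i then d.get? kf else c) c

-- 'if current_prompt: result[i] = current_prompt'  (falsy = None or "")
def emitA (res : PySem.Dict Int String) (i : Int) (c : Option String) : PySem.Dict Int String :=
  match c with
  | some s => if s = "" then res else res.insert i s
  | none => res

def expand_prompts_py (prompts : List (Int × String)) (num_frames : Int) : List (Int × String) :=
  let d := PySem.Dict.ofList prompts
  if prompts = [] then []
  else
    let sorted_frames := PySem.List.sorted (PySem.Dict.keys d) (fun x => x) false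
    ((PySem.List.pyRange 0 num_frames 1).foldl
      (fun (st : PySem.Dict Int String × Option String) i =>
        let cur := aScan d sorted_frames i st.2
        (emitA st.1 i cur, cur))
      (PySem.Dict.empty, none)).1.items

-- ===== PORT B =====
-- body of 'for kf, nxt in zip(kfs, kfs[1:] + [num_frames]):' — fill one segment.
-- d.get? kf is always `some` here (kf is a key of d, so Python's prompts[kf] cannot raise).
def segFill (d : PySem.Dict Int String) (F : Int) (res : PySem.Dict Int String) (p : Int × Int) :
    PySem.Dict Int String :=
  match d.get? p.1 with
  | none => res
  | some text =>
    if text = "" then res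
    else (PySem.List.pyRange (max p.1 0) (min p.2 F) 1).foldl (fun r i => r.insert i text) res

def expand_prompts_py_alt (prompts : List (Int × String)) (num_frames : Int) : List (Int × String) :=
  let d := PySem.Dict.ofList prompts
  if prompts = [] then []
  else
    let kfs := PySem.List.sorted (PySem.Dict.keys d) (fun x => x) false
    ((kfs.zip (kfs.drop 1 ++ [num_frames])).foldl (segFill d num_frames) PySem.Dict.empty).items

-- ===== PRECONDITION & SPEC =====
def Spec_expand_prompts_py (prompts : List (Int × String)) (num_frames : Int) (out : List (Int × String)) : Prop := out = expand_prompts_py_alt prompts num_frames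
instance (prompts : List (Int × String)) (num_frames : Int) (out : List (Int × String)) : Decidable (Spec_expand_prompts_py prompts num_frames out) := by unfold Spec_expand_prompts_py; infer_instance

-- ===== CLAIM (what is proved, stated in full; the proofs are below) =====
def Claim_equal_expand_prompts_py : Prop := ∀ (prompts : List (Int × String)) (num_frames : Int), Dom_expand_prompts_py prompts num_frames → Spec_expand_prompts_py prompts num_frames (expand_prompts_py prompts num_frames)

-- ===== LEMMAS AND PROOFS =====

-- value at the last keyframe of l, else the carried c
def lastG (d : PySem.Dict Int String) (l : List Int) (c : Option String) : Option String :=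
  match l.getLast? with
  | some k => d.get? k
  | none => c

-- closed form of A's carried current_prompt at frame i
def activeP (d : PySem.Dict Int String) (kfs : List Int) (i : Int) : Option String :=
  lastG d (kfs.takeWhile (fun k => decide (k ≤ i))) none

-- the (frame, prompt) pair frame i contributes, if any
def fMap (d : PySem.Dict Int String) (kfs : List Int) (i : Int) : Option (Int × String) :=
  (activeP d kfs i).bind (fun t => if t = "" then none else some (i, t))

-- the pairs one segment contributes
def seg (d : PySem.Dict Int String) (F : Int) (p : Int × Int) : List (Int × String) :=
  match d.get? p.1 with
  | none => []
  | some text =>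
    if text = "" then []
    else (PySem.List.pyRange (max p.1 0) (min p.2 F) 1).map (fun i => (i, text))

theorem lastG_cons (d : PySem.Dict Int String) (k : Int) (t : List Int) (c : Option String) :
    lastG d (k :: t) c = lastG d t (d.get? k) := by
  cases t with
  | nil => simp [lastG]
  | cons x t =>
    unfold lastG
    rw [List.getLast?_cons_cons]
    cases h : (x :: t).getLast? with
    | none => simp at h
    | some m => rfl

theorem lastG_ne_nil (d : PySem.Dict Int String) (l : List Int) (c : Option String)
    (h : l ≠ []) : lastG d l c = lastG d l none := by
  unfold lastG
  cases hl : l.getLast? with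
  | none => exact absurd (List.getLast?_eq_none_iff.mp hl) h
  | some k => rfl

theorem aScan_all_le (d : PySem.Dict Int String) (l : List Int) (i : Int) (c : Option String)
    (h : ∀ k ∈ l, k ≤ i) : aScan d l i c = lastG d l c := by
  induction l generalizing c with
  | nil => simp [aScan, lastG]
  | cons k t ih =>
    have hk : k ≤ i := h k (by simp)
    simp only [aScan, List.foldl_cons, if_pos hk, lastG_cons]
    exact ih (d.get? k) (fun x hx => h x (by simp [hx]))

theorem aScan_all_gt (d : PySem.Dict Int String) (l : List Int) (i : Int) (c : Option String)
    (h : ∀ k ∈ l, ¬ k ≤ i) : aScan d l i c = c := by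
  induction l generalizing c with
  | nil => rfl
  | cons k t ih =>
    have hk : ¬ k ≤ i := h k (by simp)
    simp only [aScan, List.foldl_cons, if_neg hk]
    exact ih c (fun x hx => h x (by simp [hx]))

theorem dropWhile_all_gt (l : List Int) (i : Int) (h : l.Pairwise (· ≤ ·)) :
    ∀ x ∈ l.dropWhile (fun k => decide (k ≤ i)), ¬ x ≤ i := by
  induction l with
  | nil => simp
  | cons k t ih =>
    rcases List.pairwise_cons.mp h with ⟨hk, ht⟩
    by_cases hki : k ≤ i
    · simpa [List.dropWhile_cons, hki] using ih ht
    · intro x hx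
      simp only [List.dropWhile_cons, decide_eq_true_eq, hki, if_false] at hx
      rcases List.mem_cons.mp hx with rfl | hx
      · exact hki
      · exact fun hxi => hki (le_trans (hk x hx) hxi)

theorem aScan_sorted (d : PySem.Dict Int String) (l : List Int) (i : Int) (c : Option String)
    (h : l.Pairwise (· ≤ ·)) :
    aScan d l i c = lastG d (l.takeWhile (fun k => decide (k ≤ i))) c := by
  conv_lhs => rw [← List.takeWhile_append_dropWhile (p := fun k => decide (k ≤ i)) (l := l)]
  have : aScan d (l.takeWhile (fun k => decide (k ≤ i)) ++ l.dropWhile (fun k => decide (k ≤ i))) i c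
      = aScan d (l.dropWhile (fun k => decide (k ≤ i))) i
          (aScan d (l.takeWhile (fun k => decide (k ≤ i))) i c) := by
    simp only [aScan, List.foldl_append]
  rw [this, aScan_all_gt _ _ _ _ (dropWhile_all_gt l i h), aScan_all_le]
  intro k hk
  simpa using List.mem_takeWhile_imp hk

-- the carry A holds at a later frame still yields the closed form
theorem aScan_active (d : PySem.Dict Int String) (kfs : List Int) (i i' : Int)
    (h : kfs.Pairwise (· ≤ ·)) (hii : i ≤ i') :
    aScan d kfs i' (activeP d kfs i) = activeP d kfs i' := by
  rw [aScan_sorted d kfs i' _ h]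
  by_cases hne : kfs.takeWhile (fun k => decide (k ≤ i')) = []
  · rw [hne]
    have h2 : kfs.takeWhile (fun k => decide (k ≤ i)) = [] := by
      cases kfs with
      | nil => rfl
      | cons k t =>
        simp only [List.takeWhile_cons] at hne ⊢
        by_cases hk : k ≤ i'
        · simp [hk] at hne
        · have : ¬ k ≤ i := fun hki => hk (le_trans hki hii)
          simp [this]
    simp [activeP, h2, hne, lastG]
  · rw [lastG_ne_nil d _ _ hne]; rfl

-- A's frame loop with the carry replaced by the closed form
theorem aLoop_eq (d : PySem.Dict Int String) (kfs : List Int) (h : kfs.Pairwise (· ≤ ·)) :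
    ∀ (L : List Int), L.Pairwise (· ≤ ·) →
    ∀ (c : Option String) (res : PySem.Dict Int String),
    (∀ i ∈ L, aScan d kfs i c = activeP d kfs i) →
    (L.foldl (fun (st : PySem.Dict Int String × Option String) i =>
        let cur := aScan d kfs i st.2
        (emitA st.1 i cur, cur)) (res, c)).1
    = L.foldl (fun r i => emitA r i (activeP d kfs i)) res := by
  intro L
  induction L with
  | nil => intro _ c res _; rfl
  | cons i L' ih =>
    intro hL c res hc
    rcases List.pairwise_cons.mp hL with ⟨hiL, hL'⟩
    have hcur : aScan d kfs i c = activeP d kfs i := hc i (by simp)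
    simp only [List.foldl_cons, hcur]
    exact ih hL' (activeP d kfs i) (emitA res i (activeP d kfs i))
      (fun i' hi' => aScan_active d kfs i i' h (hiL i' hi'))

-- a conditional-insert loop is an insert fold over the filterMapped list
theorem emit_fold_eq (d : PySem.Dict Int String) (kfs : List Int) :
    ∀ (L : List Int) (res : PySem.Dict Int String),
    L.foldl (fun r i => emitA r i (activeP d kfs i)) res
    = (L.filterMap (fMap d kfs)).foldl (fun r p => r.insert p.1 p.2) res := by
  intro L
  induction L with
  | nil => intro res; rfl
  | cons i L' ih =>
    intro res
    simp only [List.foldl_cons, List.filterMap_cons]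
    cases hA : activeP d kfs i with
    | none => simp only [emitA, fMap, hA, Option.bind]; exact ih res
    | some t =>
      by_cases ht : t = ""
      · simp only [emitA, fMap, hA, ht, Option.bind]
        simpa [ht] using ih res
      · simp only [emitA, fMap, hA, Option.bind, if_neg ht]
        exact ih (res.insert i t)

-- B's segment loop is an insert fold over the flatMapped segment list
theorem seg_fold_eq (d : PySem.Dict Int String) (F : Int) :
    ∀ (pairs : List (Int × Int)) (res : PySem.Dict Int String),
    pairs.foldl (segFill d F) res
    = (pairs.flatMap (seg d F)).foldl (fun r p => r.insert p.1 p.2) res := by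
  intro pairs
  induction pairs with
  | nil => intro res; rfl
  | cons p ps ih =>
    intro res
    simp only [List.foldl_cons, List.flatMap_cons, List.foldl_append]
    have hstep : segFill d F res p = (seg d F p).foldl (fun r q => r.insert q.1 q.2) res := by
      unfold segFill seg
      cases d.get? p.1 with
      | none => rfl
      | some text =>
        by_cases ht : text = ""
        · simp [ht]
        · simp only [if_neg ht, List.foldl_map]
    rw [hstep, ih]

theorem zip_chain (k : Int) (rest : List Int) (F : Int) :
    (k :: rest).zip ((k :: rest).drop 1 ++ [F])
    = (k, rest.headD F) :: rest.zip (rest.drop 1 ++ [F]) := by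
  cases rest with
  | nil => rfl
  | cons m r' => rfl

theorem seg_nil (d : PySem.Dict Int String) (F : Int) (p : Int × Int)
    (h : min p.2 F ≤ max p.1 0) : seg d F p = [] := by
  unfold seg
  cases d.get? p.1 with
  | none => rfl
  | some text =>
    by_cases ht : text = ""
    · simp [ht]
    · simp [PySem.List.pyRange_one_eq_nil h]

theorem flatMap_seg_nil (d : PySem.Dict Int String) (F : Int) (kfs : List Int)
    (h : ∀ k ∈ kfs, F ≤ max k 0) :
    (kfs.zip (kfs.drop 1 ++ [F])).flatMap (seg d F) = [] := by
  apply List.flatMap_eq_nil_iff.mpr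
  intro p hp
  have hk : p.1 ∈ kfs := by
    exact (List.of_mem_zip (l₁ := kfs) (l₂ := kfs.drop 1 ++ [F]) (by simpa using hp)).1
  exact seg_nil d F p (le_trans (min_le_right _ _) (h p.1 hk))

theorem fMap_lt_head (d : PySem.Dict Int String) (k : Int) (rest : List Int) (i : Int)
    (h : i < k) : fMap d (k :: rest) i = none := by
  have : ¬ k ≤ i := by omega
  simp [fMap, activeP, this, lastG]

theorem fMap_mid (d : PySem.Dict Int String) (k : Int) (rest : List Int) (i : Int)
    (hk : k ≤ i) (hr : ∀ x ∈ rest, i < x) :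
    fMap d (k :: rest) i = (d.get? k).bind (fun t => if t = "" then none else some (i, t)) := by
  have htw : rest.takeWhile (fun x => decide (x ≤ i)) = [] := by
    cases rest with
    | nil => rfl
    | cons m r' =>
      have : ¬ m ≤ i := by have := hr m (by simp); omega
      simp [this]
  simp [fMap, activeP, hk, htw, lastG]

theorem fMap_shift (d : PySem.Dict Int String) (k m : Int) (r' : List Int) (i : Int)
    (hk : k ≤ i) (hm : m ≤ i) :
    fMap d (k :: m :: r') i = fMap d (m :: r') i := by
  simp only [fMap, activeP, List.takeWhile_cons, decide_eq_true_eq, hk, hm, if_pos]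
  rw [lastG_cons]
  rw [lastG_ne_nil d _ _ (by simp)]

-- THE MAIN LIST LEMMA: the per-frame filterMap equals the per-segment flatMap
theorem seglist_eq (d : PySem.Dict Int String) (F : Int) :
    ∀ (kfs : List Int), kfs.Pairwise (· < ·) →
    ∀ (a : Int), 0 ≤ a → (∀ k ∈ kfs, a ≤ max k 0) →
    (PySem.List.pyRange a F 1).filterMap (fMap d kfs)
    = (kfs.zip (kfs.drop 1 ++ [F])).flatMap (seg d F) := by
  intro kfs
  induction kfs with
  | nil =>
    intro _ a _ _
    simp [fMap, activeP, lastG]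
  | cons k rest ih =>
    intro hp a ha hinv
    rcases List.pairwise_cons.mp hp with ⟨hkr, hrest⟩
    have hak : a ≤ max k 0 := hinv k (by simp)
    rw [zip_chain]
    set m := rest.headD F with hm
    have hkmF : k < m ∨ m = F := by
      cases rest with
      | nil => right; simp [hm]
      | cons x r' => left; have := hkr x (by simp); simpa [hm] using this
    simp only [List.flatMap_cons]
    by_cases haF : F < a
    · -- the whole frame range is empty, and so is every segment
      rw [PySem.List.pyRange_one_eq_nil (by omega), List.filterMap_nil]
      rw [seg_nil d F (k, m) (by dsimp only; omega)]
      rw [flatMap_seg_nil d F rest (fun k' hk' => by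
        have := hinv k' (by simp [hk']); omega)]
      rfl
    · by_cases hkF : F < k
      · -- head keyframe at or past num_frames: everything is empty
        have h1 : ∀ i ∈ PySem.List.pyRange a F 1, fMap d (k :: rest) i = none := by
          intro i hi
          have := (PySem.List.mem_pyRange_one.mp hi).2
          exact fMap_lt_head d k rest i (by omega)
        rw [List.filterMap_eq_nil_iff.mpr h1]
        rw [seg_nil d F (k, m) (by dsimp only; omega)]
        rw [flatMap_seg_nil d F rest (fun k' hk' => by
          have := hkr k' hk'; omega)]
        rfl
      · -- real case: a ≤ F, k ≤ F
        have hc1 : max a (min k F) = max k 0 := by omega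
        set c2 : Int := max a (min m F) with hc2
        have hsplit : PySem.List.pyRange a F 1
            = PySem.List.pyRange a (max k 0) 1 ++ PySem.List.pyRange (max k 0) c2 1
              ++ PySem.List.pyRange c2 F 1 := by
          rw [← PySem.List.pyRange_one_append a (max k 0) c2 (by omega) (by omega)]
          rw [← PySem.List.pyRange_one_append a c2 F (by omega) (by omega)]
        rw [hsplit, List.filterMap_append, List.filterMap_append]
        -- chunk 1: before the first keyframe, nothing is emitted
        have h1 : (PySem.List.pyRange a (max k 0) 1).filterMap (fMap d (k :: rest)) = [] := by
          apply List.filterMap_eq_nil_iff.mpr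
          intro i hi
          rcases PySem.List.mem_pyRange_one.mp hi with ⟨hia, hik⟩
          exact fMap_lt_head d k rest i (by omega)
        -- chunk 2: the head keyframe's segment
        have h2 : (PySem.List.pyRange (max k 0) c2 1).filterMap (fMap d (k :: rest))
            = seg d F (k, m) := by
          have hmem : ∀ i ∈ PySem.List.pyRange (max k 0) c2 1,
              fMap d (k :: rest) i = (d.get? k).bind (fun t => if t = "" then none else some (i, t)) := by
            intro i hi
            rcases PySem.List.mem_pyRange_one.mp hi with ⟨hik, hic⟩
            apply fMap_mid d k rest i (by omega)
            intro x hx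
            have hxm : m ≤ x := by
              cases rest with
              | nil => simp at hx
              | cons y r' =>
                rcases List.mem_cons.mp hx with rfl | hx'
                · simp [hm]
                · have h1 := hkr x (by simp [hx'])
                  have h2 : y < x := (List.pairwise_cons.mp hrest).1 x hx'
                  simp only [hm, List.headD_cons]; omega
            omega
          rw [List.filterMap_congr hmem]
          cases hg : d.get? k with
          | none => simp [seg, hg]
          | some text =>
            by_cases ht : text = ""
            · simp [seg, hg, ht]
            · have hfm : (PySem.List.pyRange (max k 0) c2 1).filterMap
                  (fun i => (some text).bind (fun t => if t = "" then none else some (i, t)))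
                  = (PySem.List.pyRange (max k 0) c2 1).map (fun i => (i, text)) := by
                simp [ht]
              rw [hfm]
              simp only [seg, hg, if_neg ht]
              by_cases hr : min m F ≤ max k 0
              · rw [PySem.List.pyRange_one_eq_nil (by omega),
                  PySem.List.pyRange_one_eq_nil hr]
              · have hc : c2 = min m F := by omega
                rw [hc]
        -- chunk 3: later frames never see the head keyframe's value
        have h3 : (PySem.List.pyRange c2 F 1).filterMap (fMap d (k :: rest))
            = (rest.zip (rest.drop 1 ++ [F])).flatMap (seg d F) := by
          cases rest with
          | nil =>
            have hmF : m = F := by simpa using hm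
            have hcF : c2 = F := by omega
            rw [hcF, PySem.List.pyRange_one_eq_nil (by omega)]
            rfl
          | cons y r' =>
            have hmy : m = y := by simpa using hm
            by_cases hyF : F < y
            · rw [PySem.List.pyRange_one_eq_nil (by omega), List.filterMap_nil]
              rw [flatMap_seg_nil d F (y :: r') (fun k' hk' => by
                rcases List.mem_cons.mp hk' with rfl | hk''
                · omega
                · have := (List.pairwise_cons.mp hrest).1 k' hk''; omega)]
            · have hcong : ∀ i ∈ PySem.List.pyRange c2 F 1,
                  fMap d (k :: y :: r') i = fMap d (y :: r') i := by
                intro i hi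
                rcases PySem.List.mem_pyRange_one.mp hi with ⟨hic, hiF⟩
                have hky : k < y := hkr y (by simp)
                exact fMap_shift d k y r' i (by omega) (by omega)
              rw [List.filterMap_congr hcong]
              exact ih hrest c2 (by omega) (fun k' hk' => by
                rcases List.mem_cons.mp hk' with rfl | hk''
                · omega
                · have := (List.pairwise_cons.mp hrest).1 k' hk''; omega)
        rw [h1, h2, h3]
        simp

-- ===== VERDICT (by name: the statement is the Claim_ definition above) =====
theorem expand_prompts_py_spec : Claim_equal_expand_prompts_py := by
  intro prompts num_frames _
  unfold Spec_expand_prompts_py expand_prompts_py expand_prompts_py_alt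
  by_cases hp : prompts = []
  · simp [hp]
  · simp only [hp, if_false]
    set d := PySem.Dict.ofList prompts with hd
    set kfs := PySem.List.sorted (PySem.Dict.keys d) (fun x => x) false with hkfs
    have hle : kfs.Pairwise (· ≤ ·) := PySem.List.sorted_pairwise _ _
    have hlt : kfs.Pairwise (· < ·) := by
      have hnd : kfs.Nodup :=
        (PySem.List.sorted_perm _ _ _).nodup_iff.mpr (PySem.Dict.nodup_keys_ofList prompts)
      exact hle.imp₂ (fun a b hab hne => lt_of_le_of_ne hab hne) hnd
    have hframes : (PySem.List.pyRange 0 num_frames 1).Pairwise (· ≤ ·) :=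
      (PySem.List.pairwise_lt_pyRange_one 0 num_frames).imp le_of_lt
    rw [aLoop_eq d kfs hle _ hframes none PySem.Dict.empty
      (fun i _ => by rw [aScan_sorted d kfs i none hle]; rfl)]
    rw [emit_fold_eq, seg_fold_eq]
    rw [seglist_eq d num_frames kfs hlt 0 le_rfl (fun k _ => le_max_right k 0)]
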